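-- pv_equiv track=rewrite | github.com/codebidoof/pccp | 프로그래머스/3/81303. 표 편집/표 편집.py | solution
-- ===== SOURCE A (Python) =====
-- def solution(n, k, cmd):
--     stack = [] # 삭제된 entity를 담는 스택
--     current = k #선택상태인 행 번호. 고유 행 번호를 포인터가 가리키는 메모리 주소로 생각하자.
--     cmdList = [] # 명령어들 리스트
--
--     # [left, 고유 행 번호, right]
--     entityList = [[i-1, i, i+1 if i < n-1 else -1] for i in range(n)]
--
--     # 입력 명령어들 파싱해서 저장
--     for c in cmd:
--         if " " in c:
--             cmdList.append(c.split(" "))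
--         else:
--             cmdList.append(c)
--
--     # 명령어 순차적으로 실행
--     for cm in cmdList:
--         if cm[0] == "U":
--             for _ in range(int(cm[1])) :
--                 current = entityList[current][0] # left필드를 통해 갱신
--         elif cm[0] == "D":
--             for _ in range(int(cm[1])):
--                 current = entityList[current][2] # right필드를 통해 갱신
--         elif cm == "C": # 삭제
--             temp = entityList[current] # 삭제할 노드
--             l = temp[0] # 삭제할 노드의 이전 거
--             r = temp[2] # 삭제할 노드의 다음 거
--
--             # 왼쪽 연결 처리
--             if l != -1:
--                 entityList[l][2] = r
--             # 오른쪽 연결 처리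
--             if r != -1:
--                 entityList[r][0] = l
--
--             stack.append(temp[:])
--             current = r if r != -1 else l
--
--         elif cm == "Z": # 복원
--             temp = stack.pop()
--             l = temp[0]
--             v = temp[1]
--             r = temp[2]
--
--             if l != -1:
--                 entityList[l][2] = v
--             if r != -1:
--                 entityList[r][0] = v
--
--     anslist = ["O"]*n
--     while stack:
--         temp = stack.pop()
--         anslist[temp[1]] = "X"
--
--     answer = "".join(anslist)
--     return answer
-- ===== SOURCE B (Python) =====
-- def _prev_live(deleted, cur):
--     i = cur - 1
--     while i >= 0 and deleted[i]:
--         i -= 1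
--     return i if i >= 0 else -1
--
--
-- def _next_live(deleted, cur):
--     m = len(deleted)
--     i = cur + 1
--     while i < m and deleted[i]:
--         i += 1
--     return i if i < m else -1
--
--
-- def solution(n, k, cmd):
--     deleted = [False] * n
--     removed = []
--     cur = k
--     for c in cmd:
--         if c == "C":
--             removed.append(cur)
--             deleted[cur] = True
--             nxt = _next_live(deleted, cur)
--             cur = nxt if nxt != -1 else _prev_live(deleted, cur)
--         elif c == "Z":
--             deleted[removed.pop()] = False
--         else:
--             parts = c.split(" ")
--             if parts[0] == "U":
--                 for _ in range(int(parts[1])):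
--                     cur = _prev_live(deleted, cur)
--             elif parts[0] == "D":
--                 for _ in range(int(parts[1])):
--                     cur = _next_live(deleted, cur)
--     return "".join("X" if d else "O" for d in deleted)
-- ===== Notes on version B (the rewrite author's own statement) =====
-- stated objective: simpler
-- what changed: Replaces A's hand-maintained doubly-linked list (entityList of [left,id,right] triples with pointer surgery on delete/restore and a stack of copied triples) by a boolean deleted-flag array with skip-scan cursor movement and a stack of plain row ids; the final answer is read off the flags instead of replaying the stack. …
-- outside the precondition, e.g. on solution(3, 0, ['D1', 'C']): A returns 'OXO', B returns 'XOO'; on solution(5, 0, ['U 2', 'D 1', 'U 1', 'C', 'U 0']): A returns 'OOOXO', B returns 'OOOOX'; on solution(4, -1, ['C', 'C', 'U 2']): A returns 'OOXX', B returns 'XOOX'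
import Mathlib
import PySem

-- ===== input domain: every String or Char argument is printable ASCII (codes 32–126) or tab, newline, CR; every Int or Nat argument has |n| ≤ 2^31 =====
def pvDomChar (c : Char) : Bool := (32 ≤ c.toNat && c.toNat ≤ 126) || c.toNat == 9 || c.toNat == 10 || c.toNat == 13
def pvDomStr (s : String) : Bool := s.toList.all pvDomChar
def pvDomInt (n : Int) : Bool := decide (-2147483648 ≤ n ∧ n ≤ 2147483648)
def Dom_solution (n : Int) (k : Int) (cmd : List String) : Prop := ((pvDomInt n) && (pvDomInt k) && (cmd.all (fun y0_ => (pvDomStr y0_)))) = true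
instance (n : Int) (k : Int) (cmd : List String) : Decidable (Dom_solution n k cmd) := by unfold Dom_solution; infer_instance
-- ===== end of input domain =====

-- B replaces A's hand-maintained doubly-linked list (left/right pointer surgery, stack of
-- [left,id,right] triples) by a boolean deleted-flag array with skip-scan cursor moves and a
-- stack of plain row ids; objective: simpler.

-- ===== PORT A =====
-- A's doubly-linked list: entityList[i] = [left, i, right]; a command is either a split list
-- (Sum.inl) or the raw string (Sum.inr), exactly as Python's heterogeneous cmdList.

-- current = entityList[current][0]  (defaults fire only outside Pre_solution, where Python raises)
def solAHop0 (eL : List (List Int)) (cur : Int) : Int :=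
  ((PySem.List.pyGet? eL cur).bind (fun e => PySem.List.pyGet? e 0)).getD 0

-- current = entityList[current][2]
def solAHop2 (eL : List (List Int)) (cur : Int) : Int :=
  ((PySem.List.pyGet? eL cur).bind (fun e => PySem.List.pyGet? e 2)).getD 0

-- entityList[i][j] = v
def solASet (eL : List (List Int)) (i : Int) (j : Int) (v : Int) : List (List Int) :=
  PySem.List.pySetD eL i (PySem.List.pySetD ((PySem.List.pyGet? eL i).getD []) j v)

-- the parsing loop: c.split(" ") if " " in c else c
def solAParse (c : String) : Sum (List String) String :=
  if PySem.Str.isIn " " c then Sum.inl ((PySem.Str.split? c " ").getD []) else Sum.inr c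

-- one iteration of A's command loop; state = (entityList, stack, current)
def solAStep (st : List (List Int) × List (List Int) × Int) (cm : Sum (List String) String) :
    List (List Int) × List (List Int) × Int :=
  let eL := st.1; let stk := st.2.1; let cur := st.2.2
  match cm with
  | Sum.inl parts =>
      let p0 := (PySem.List.pyGet? parts 0).getD ""
      if p0 = "U" then
        let x := (PySem.Int.ofStr? ((PySem.List.pyGet? parts 1).getD "")).getD 0
        (eL, stk, (PySem.List.pyRange 0 x 1).foldl (fun c _ => solAHop0 eL c) cur)
      else if p0 = "D" then
        let x := (PySem.Int.ofStr? ((PySem.List.pyGet? parts 1).getD "")).getD 0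
        (eL, stk, (PySem.List.pyRange 0 x 1).foldl (fun c _ => solAHop2 eL c) cur)
      else st
  | Sum.inr s =>
      let c0 := (PySem.Str.pyGet? s 0).getD ' '
      if c0 = 'U' then
        let x := (PySem.Int.ofChars? [(PySem.Str.pyGet? s 1).getD ' ']).getD 0
        (eL, stk, (PySem.List.pyRange 0 x 1).foldl (fun c _ => solAHop0 eL c) cur)
      else if c0 = 'D' then
        let x := (PySem.Int.ofChars? [(PySem.Str.pyGet? s 1).getD ' ']).getD 0
        (eL, stk, (PySem.List.pyRange 0 x 1).foldl (fun c _ => solAHop2 eL c) cur)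
      else if s = "C" then
        let temp := (PySem.List.pyGet? eL cur).getD []
        let l := (PySem.List.pyGet? temp 0).getD 0
        let r := (PySem.List.pyGet? temp 2).getD 0
        let eL1 := if l ≠ -1 then solASet eL l 2 r else eL
        let eL2 := if r ≠ -1 then solASet eL1 r 0 l else eL1
        (eL2, stk ++ [temp], if r ≠ -1 then r else l)
      else if s = "Z" then
        match PySem.List.pop? stk with
        | none => st   -- Python raises here (pop from empty list); outside Pre_solution
        | some (temp, stk') =>
          let l := (PySem.List.pyGet? temp 0).getD 0
          let v := (PySem.List.pyGet? temp 1).getD 0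
          let r := (PySem.List.pyGet? temp 2).getD 0
          let eL1 := if l ≠ -1 then solASet eL l 2 v else eL
          let eL2 := if r ≠ -1 then solASet eL1 r 0 v else eL1
          (eL2, stk', cur)
      else st

def solution (n : Int) (k : Int) (cmd : List String) : String :=
  let entityList := (PySem.List.pyRange 0 n 1).map (fun i => [i-1, i, if i < n-1 then i+1 else -1])
  let cmdList := cmd.map solAParse
  let fin := cmdList.foldl solAStep (entityList, [], k)
  let anslist := List.replicate n.toNat "O"
  let marked := fin.2.1.reverse.foldl
    (fun al t => PySem.List.pySetD al ((PySem.List.pyGet? t 1).getD 0) "X") anslist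
  PySem.Str.join "" marked

-- ===== PORT B =====
-- B: a boolean `deleted` array, a cursor that scans past deleted rows, a stack of row ids.

-- i = cur-1; while i >= 0 and deleted[i]: i -= 1; return i if i >= 0 else -1
def solBPrevAux (del : List Bool) (i : Int) : Int :=
  if 0 ≤ i ∧ (PySem.List.pyGet? del i).getD false = true then solBPrevAux del (i - 1)
  else if 0 ≤ i then i else -1
termination_by (i + 1).toNat
decreasing_by omega

def solBPrev (del : List Bool) (cur : Int) : Int := solBPrevAux del (cur - 1)

-- i = cur+1; while i < len(deleted) and deleted[i]: i += 1; return i if i < len(deleted) else -1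
def solBNextAux (del : List Bool) (i : Int) : Int :=
  if i < (del.length : Int) ∧ (PySem.List.pyGet? del i).getD false = true then solBNextAux del (i + 1)
  else if i < (del.length : Int) then i else -1
termination_by ((del.length : Int) - i).toNat
decreasing_by omega

def solBNext (del : List Bool) (cur : Int) : Int := solBNextAux del (cur + 1)

-- one iteration of B's loop; state = (deleted, removed, cur)
-- (the .getD defaults fire only outside Pre_solution, where Python raises)
def solBStep (st : List Bool × List Int × Int) (c : String) : List Bool × List Int × Int :=
  let del := st.1; let stk := st.2.1; let cur := st.2.2
  if c = "C" then
    let stk' := stk ++ [cur]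
    let del' := PySem.List.pySetD del cur true
    let nx := solBNext del' cur
    (del', stk', if nx ≠ -1 then nx else solBPrev del' cur)
  else if c = "Z" then
    match PySem.List.pop? stk with
    | none => st   -- Python raises here (pop from empty list); outside Pre_solution
    | some (d, stk') => (PySem.List.pySetD del d false, stk', cur)
  else
    let parts := (PySem.Str.split? c " ").getD []
    let p0 := (PySem.List.pyGet? parts 0).getD ""
    if p0 = "U" then
      let x := (PySem.Int.ofStr? ((PySem.List.pyGet? parts 1).getD "")).getD 0
      (del, stk, (PySem.List.pyRange 0 x 1).foldl (fun cu _ => solBPrev del cu) cur)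
    else if p0 = "D" then
      let x := (PySem.Int.ofStr? ((PySem.List.pyGet? parts 1).getD "")).getD 0
      (del, stk, (PySem.List.pyRange 0 x 1).foldl (fun cu _ => solBNext del cu) cur)
    else st

def solution_alt (n : Int) (k : Int) (cmd : List String) : String :=
  let fin := cmd.foldl solBStep (List.replicate n.toNat false, [], k)
  PySem.Str.join "" (fin.1.map (fun d => if d then "X" else "O"))

-- ===== PRECONDITION & SPEC =====
-- The abstract command model used only to STATE the precondition: a command either raises or
-- is excluded (mParse = none), or is up/down by x, delete, restore, or a no-op.
inductive MCmd where
  | up (x : Int) | down (x : Int) | del | restore | noop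
deriving DecidableEq

def mParse (c : String) : Option MCmd :=
  if c = "C" then some MCmd.del
  else if c = "Z" then some MCmd.restore
  else if PySem.Str.isIn " " c then
    let p0 := (PySem.List.pyGet? ((PySem.Str.split? c " ").getD []) 0).getD ""
    if p0 = "U" ∨ p0 = "D" then
      (PySem.List.pyGet? ((PySem.Str.split? c " ").getD []) 1).bind (fun t =>
        (PySem.Int.ofStr? t).map (fun x => if p0 = "U" then MCmd.up x else MCmd.down x))
    else some MCmd.noop
  else
    (PySem.Str.pyGet? c 0).bind (fun c0 =>
      if c0 = 'U' ∨ c0 = 'D' then none else some MCmd.noop)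

-- nearest not-deleted row strictly below i (−1 if none); structural so that `decide` computes
def mPrevAux (ds : List Int) : Nat → Int
  | 0 => -1
  | j + 1 => if (j : Int) ∈ ds then mPrevAux ds j else (j : Int)

def mPrev (ds : List Int) (i : Int) : Int := mPrevAux ds i.toNat

-- nearest not-deleted row strictly above i and below n (−1 if none)
def mNextAux (n : Int) (ds : List Int) : Nat → Int → Int
  | 0, _ => -1
  | f + 1, i => if i + 1 < n then (if (i + 1) ∈ ds then mNextAux n ds f (i + 1) else i + 1) else -1

def mNext (n : Int) (ds : List Int) (i : Int) : Int := mNextAux n ds (n - i).toNat i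

-- x single moves; each move reads the row at `cur`, so `cur` must be a real row index
def mSteps (n : Int) (mv : List Int → Int → Int) (ds : List Int) : Nat → Int → Option Int
  | 0, cur => some cur
  | s + 1, cur => if 0 ≤ cur ∧ cur < n then mSteps n mv ds s (mv ds cur) else none

def mStep (n : Int) (st : Int × List Int) (m : MCmd) : Option (Int × List Int) :=
  match m with
  | MCmd.up x => (mSteps n mPrev st.2 x.toNat st.1).map (fun c => (c, st.2))
  | MCmd.down x => (mSteps n (mNext n) st.2 x.toNat st.1).map (fun c => (c, st.2))
  | MCmd.del =>
      if 0 ≤ st.1 ∧ st.1 < n ∧ st.1 ∉ st.2 then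
        let r := mNext n st.2 st.1
        some ((if r ≠ -1 then r else mPrev st.2 st.1), st.2 ++ [st.1])
      else none
  | MCmd.restore => if st.2 = [] then none else some (st.1, st.2.dropLast)
  | MCmd.noop => some st

def mRunFrom (n : Int) (st : Int × List Int) (cmd : List String) : Option (Int × List Int) :=
  cmd.foldl (fun ost c => ost.bind (fun s => (mParse c).bind (mStep n s))) (some st)

-- Pre_solution: the command trace is valid — no command raises (A raises on malformed
-- commands, on Z with an empty stack, and on moves walking off the top/bottom into a
-- genuinely absent row), no move ever reads a negative or too-large index into the row table
-- (on such reads Python's negative-index wraparound lets A return a value that is an accident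
-- of the list representation), and no command is a space-less string starting with 'U'/'D'
-- such as "U5" (A accidentally reads its second character as the move count; B treats only
-- "U x"/"D x"/"C"/"Z" as commands and ignores other words, so either value is a guess there).
def Pre_solution (n : Int) (k : Int) (cmd : List String) : Prop :=
  (mRunFrom n (k, []) cmd).isSome = true
instance (n : Int) (k : Int) (cmd : List String) : Decidable (Pre_solution n k cmd) := by
  unfold Pre_solution; infer_instance

def pvWitness_solution : Int × Int × List String := (3, 0, ["D 2", "C", "Z", "U 1", "C"])

def Spec_solution (n : Int) (k : Int) (cmd : List String) (out : String) : Prop := out = solution_alt n k cmd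
instance (n : Int) (k : Int) (cmd : List String) (out : String) : Decidable (Spec_solution n k cmd out) := by unfold Spec_solution; infer_instance

-- ===== CLAIM (what is proved, stated in full; the proofs are below) =====
def Claim_equal_solution : Prop := ∀ (n : Int) (k : Int) (cmd : List String), Dom_solution n k cmd → Pre_solution n k cmd → Spec_solution n k cmd (solution n k cmd)

-- ===== LEMMAS AND PROOFS =====

-- the entity triple A's list holds at row i when the rows in `ds` are deleted (deleted rows
-- keep the links they had when they were deleted, i.e. w.r.t. the prefix of ds before them)
def entTake (n : Int) (ds : List Int) (i : Int) : List Int :=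
  [mPrev (ds.take (ds.idxOf i)) i, i, mNext n (ds.take (ds.idxOf i)) i]

def entsOf (n : Int) (ds : List Int) : List (List Int) :=
  (PySem.List.pyRange 0 n 1).map (entTake n ds)

def stkOf (n : Int) (pre ds : List Int) : List (List Int) :=
  match ds with
  | [] => []
  | d :: rest => [mPrev pre d, d, mNext n pre d] :: stkOf n (pre ++ [d]) rest

def flagsOf (n : Int) (ds : List Int) : List Bool :=
  (List.range n.toNat).map (fun i : Nat => decide ((i : Int) ∈ ds))

theorem mPrev_unfold (ds : List Int) (i : Int) :
    mPrev ds i = if 0 < i then (if (i - 1) ∈ ds then mPrev ds (i - 1) else i - 1) else -1 := by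
  unfold mPrev
  by_cases h : 0 < i
  · have hc : i.toNat = (i - 1).toNat + 1 := by omega
    rw [hc, if_pos h]
    simp only [mPrevAux]
    rw [Int.toNat_of_nonneg (by omega : (0 : Int) ≤ i - 1)]
  · have hc : i.toNat = 0 := by omega
    rw [hc, if_neg h]
    rfl

theorem mNext_unfold (n : Int) (ds : List Int) (i : Int) :
    mNext n ds i = if i + 1 < n then (if (i + 1) ∈ ds then mNext n ds (i + 1) else i + 1) else -1 := by
  unfold mNext
  by_cases h : i + 1 < n
  · have hc : (n - i).toNat = (n - (i + 1)).toNat + 1 := by omega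
    rw [hc, if_pos h]
    simp only [mNextAux]
    rw [if_pos h]
  · rw [if_neg h]
    cases hf : (n - i).toNat with
    | zero => rfl
    | succ f =>
      simp only [mNextAux]
      rw [if_neg h]

theorem mPrev_cases (ds : List Int) (i : Int) :
    (mPrev ds i = -1 ∧ ∀ j, 0 ≤ j → j < i → j ∈ ds) ∨
    (0 ≤ mPrev ds i ∧ mPrev ds i < i ∧ mPrev ds i ∉ ds ∧ ∀ j, mPrev ds i < j → j < i → j ∈ ds) := by
  suffices H : ∀ f : Nat, ∀ i : Int, i.toNat ≤ f →
      (mPrev ds i = -1 ∧ ∀ j, 0 ≤ j → j < i → j ∈ ds) ∨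
      (0 ≤ mPrev ds i ∧ mPrev ds i < i ∧ mPrev ds i ∉ ds ∧
        ∀ j, mPrev ds i < j → j < i → j ∈ ds) from H i.toNat i le_rfl
  intro f
  induction f with
  | zero =>
    intro i hf
    rw [mPrev_unfold, if_neg (by omega)]
    left
    exact ⟨rfl, fun j hj hj' => absurd hj' (by omega)⟩
  | succ f ihf =>
    intro i hf
    rw [mPrev_unfold]
    by_cases hi : 0 < i
    · rw [if_pos hi]
      by_cases hmem : (i - 1) ∈ ds
      · rw [if_pos hmem]
        rcases ihf (i - 1) (by omega) with ⟨h1, h2⟩ | ⟨h1, h2, h3, h4⟩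
        · left; exact ⟨h1, fun j hj hj' => by rcases eq_or_lt_of_le (by omega : j ≤ i-1) with h|h
                                              · exact h ▸ hmem
                                              · exact h2 j hj h⟩
        · right; refine ⟨h1, by omega, h3, fun j hj hj' => ?_⟩
          rcases eq_or_lt_of_le (by omega : j ≤ i-1) with h|h
          · exact h ▸ hmem
          · exact h4 j hj h
      · rw [if_neg hmem]
        right; exact ⟨by omega, by omega, hmem, fun j hj hj' => by omega⟩
    · rw [if_neg hi]
      left; exact ⟨rfl, fun j hj hj' => by omega⟩

theorem mNext_cases (n : Int) (ds : List Int) (i : Int) :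
    (mNext n ds i = -1 ∧ ∀ j, i < j → j < n → j ∈ ds) ∨
    (i < mNext n ds i ∧ mNext n ds i < n ∧ mNext n ds i ∉ ds ∧
      ∀ j, i < j → j < mNext n ds i → j ∈ ds) := by
  suffices H : ∀ f : Nat, ∀ i : Int, (n - i).toNat ≤ f →
      (mNext n ds i = -1 ∧ ∀ j, i < j → j < n → j ∈ ds) ∨
      (i < mNext n ds i ∧ mNext n ds i < n ∧ mNext n ds i ∉ ds ∧
        ∀ j, i < j → j < mNext n ds i → j ∈ ds) from H (n - i).toNat i le_rfl
  intro f
  induction f with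
  | zero =>
    intro i hf
    rw [mNext_unfold, if_neg (by omega)]
    left
    exact ⟨rfl, fun j hj hj' => absurd hj' (by omega)⟩
  | succ f ihf =>
    intro i hf
    rw [mNext_unfold]
    by_cases hi : i + 1 < n
    · rw [if_pos hi]
      by_cases hmem : (i + 1) ∈ ds
      · rw [if_pos hmem]
        rcases ihf (i + 1) (by omega) with ⟨h1, h2⟩ | ⟨h1, h2, h3, h4⟩
        · left; exact ⟨h1, fun j hj hj' => by rcases eq_or_lt_of_le (by omega : i+1 ≤ j) with h|h
                                              · exact h ▸ hmem
                                              · exact h2 j h hj'⟩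
        · right; refine ⟨by omega, h2, h3, fun j hj hj' => ?_⟩
          rcases eq_or_lt_of_le (by omega : i+1 ≤ j) with h|h
          · exact h ▸ hmem
          · exact h4 j h hj'
      · rw [if_neg hmem]
        right; exact ⟨by omega, hi, hmem, fun j hj hj' => by omega⟩
    · rw [if_neg hi]
      left; exact ⟨rfl, fun j hj hj' => by omega⟩

theorem mPrev_eq_of {ds : List Int} {i p : Int} (h0 : 0 ≤ p) (h1 : p < i) (h2 : p ∉ ds)
    (h3 : ∀ j, p < j → j < i → j ∈ ds) : mPrev ds i = p := by
  rcases mPrev_cases ds i with ⟨hq, hall⟩ | ⟨q0, qlt, qnm, qbet⟩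
  · exact absurd (hall p h0 h1) h2
  · rcases lt_trichotomy (mPrev ds i) p with h | h | h
    · exact absurd (qbet p h h1) h2
    · exact h
    · exact absurd (h3 _ h qlt) qnm

theorem mPrev_eq_neg_of {ds : List Int} {i : Int} (h : ∀ j, 0 ≤ j → j < i → j ∈ ds) :
    mPrev ds i = -1 := by
  rcases mPrev_cases ds i with ⟨hq, _⟩ | ⟨q0, qlt, qnm, _⟩
  · exact hq
  · exact absurd (h _ q0 qlt) qnm

theorem mNext_eq_of {n : Int} {ds : List Int} {i q : Int} (h1 : i < q) (h1' : q < n) (h2 : q ∉ ds)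
    (h3 : ∀ j, i < j → j < q → j ∈ ds) : mNext n ds i = q := by
  rcases mNext_cases n ds i with ⟨hq, hall⟩ | ⟨q0, qlt, qnm, qbet⟩
  · exact absurd (hall q h1 h1') h2
  · rcases lt_trichotomy (mNext n ds i) q with h | h | h
    · exact absurd (h3 _ q0 h) qnm
    · exact h
    · exact absurd (qbet q h1 h) h2

theorem mNext_eq_neg_of {n : Int} {ds : List Int} {i : Int} (h : ∀ j, i < j → j < n → j ∈ ds) :
    mNext n ds i = -1 := by
  rcases mNext_cases n ds i with ⟨hq, _⟩ | ⟨q0, qlt, qnm, _⟩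
  · exact hq
  · exact absurd (h _ q0 qlt) qnm

theorem mPrev_append_ge (ds : List Int) {c i : Int} (h : i ≤ c) :
    mPrev (ds ++ [c]) i = mPrev ds i := by
  rcases mPrev_cases ds i with ⟨hq, hall⟩ | ⟨q0, qlt, qnm, qbet⟩
  · rw [hq]; exact mPrev_eq_neg_of (fun j hj hj' => List.mem_append_left _ (hall j hj hj'))
  · refine mPrev_eq_of q0 qlt ?_ (fun j hj hj' => List.mem_append_left _ (qbet j hj hj'))
    simp only [List.mem_append, List.mem_singleton]
    rintro (hq | hq)
    · exact qnm hq
    · omega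

theorem mNext_append_le (n : Int) (ds : List Int) {c i : Int} (h : c ≤ i) :
    mNext n (ds ++ [c]) i = mNext n ds i := by
  rcases mNext_cases n ds i with ⟨hq, hall⟩ | ⟨q0, qlt, qnm, qbet⟩
  · rw [hq]; exact mNext_eq_neg_of (fun j hj hj' => List.mem_append_left _ (hall j hj hj'))
  · refine mNext_eq_of q0 qlt ?_ (fun j hj hj' => List.mem_append_left _ (qbet j hj hj'))
    simp only [List.mem_append, List.mem_singleton]
    rintro (hq | hq)
    · exact qnm hq
    · omega

theorem mPrev_append_of_ne {n : Int} {ds : List Int} {c i : Int} (hic : c < i) (hin : i < n)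
    (hr : mNext n ds c ≠ i) (hnm : i ∉ ds) : mPrev (ds ++ [c]) i = mPrev ds i := by
  rcases mPrev_cases ds i with ⟨hq, hall⟩ | ⟨q0, qlt, qnm, qbet⟩
  · rw [hq]; exact mPrev_eq_neg_of (fun j hj hj' => List.mem_append_left _ (hall j hj hj'))
  · refine mPrev_eq_of q0 qlt ?_ (fun j hj hj' => List.mem_append_left _ (qbet j hj hj'))
    simp only [List.mem_append, List.mem_singleton]
    rintro (hq | hq)
    · exact qnm hq
    · subst hq
      exact hr (mNext_eq_of hic hin hnm (fun j h1 h2 => qbet j h1 h2))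

theorem mNext_append_of_ne {n : Int} {ds : List Int} {c i : Int} (hic : i < c) (hi0 : 0 ≤ i)
    (hl : mPrev ds c ≠ i) (hnm : i ∉ ds) : mNext n (ds ++ [c]) i = mNext n ds i := by
  rcases mNext_cases n ds i with ⟨hq, hall⟩ | ⟨q0, qlt, qnm, qbet⟩
  · rw [hq]; exact mNext_eq_neg_of (fun j hj hj' => List.mem_append_left _ (hall j hj hj'))
  · refine mNext_eq_of q0 qlt ?_ (fun j hj hj' => List.mem_append_left _ (qbet j hj hj'))
    simp only [List.mem_append, List.mem_singleton]
    rintro (hq | hq)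
    · exact qnm hq
    · subst hq
      exact hl (mPrev_eq_of hi0 hic hnm (fun j h1 h2 => qbet j h1 h2))

theorem mNext_append_prev (n : Int) (ds : List Int) (c : Int) (hl : mPrev ds c ≠ -1) :
    mNext n (ds ++ [c]) (mPrev ds c) = mNext n ds c := by
  rcases mPrev_cases ds c with ⟨hq, _⟩ | ⟨l0, llt, lnm, lbet⟩
  · exact absurd hq hl
  · rcases mNext_cases n ds c with ⟨hq, rall⟩ | ⟨r0, rlt, rnm, rbet⟩
    · rw [hq]
      refine mNext_eq_neg_of (fun j hj hj' => ?_)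
      simp only [List.mem_append, List.mem_singleton]
      rcases lt_trichotomy j c with h | h | h
      · exact Or.inl (lbet j hj h)
      · exact Or.inr h
      · exact Or.inl (rall j h hj')
    · refine mNext_eq_of (by omega) rlt ?_ (fun j hj hj' => ?_)
      · simp only [List.mem_append, List.mem_singleton]
        rintro (hq | hq)
        · exact rnm hq
        · omega
      · simp only [List.mem_append, List.mem_singleton]
        rcases lt_trichotomy j c with h | h | h
        · exact Or.inl (lbet j hj h)
        · exact Or.inr h
        · exact Or.inl (rbet j h hj')

theorem mPrev_append_next (n : Int) (ds : List Int) (c : Int)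
    (hr : mNext n ds c ≠ -1) : mPrev (ds ++ [c]) (mNext n ds c) = mPrev ds c := by
  rcases mNext_cases n ds c with ⟨hq, _⟩ | ⟨r0, rlt, rnm, rbet⟩
  · exact absurd hq hr
  · rcases mPrev_cases ds c with ⟨hq, lall⟩ | ⟨l0, llt, lnm, lbet⟩
    · rw [hq]
      refine mPrev_eq_neg_of (fun j hj hj' => ?_)
      simp only [List.mem_append, List.mem_singleton]
      rcases lt_trichotomy j c with h | h | h
      · exact Or.inl (lall j hj h)
      · exact Or.inr h
      · exact Or.inl (rbet j h hj')
    · refine mPrev_eq_of l0 (by omega) ?_ (fun j hj hj' => ?_)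
      · simp only [List.mem_append, List.mem_singleton]
        rintro (hq | hq)
        · exact lnm hq
        · omega
      · simp only [List.mem_append, List.mem_singleton]
        rcases lt_trichotomy j c with h | h | h
        · exact Or.inl (lbet j hj h)
        · exact Or.inr h
        · exact Or.inl (rbet j h hj')


theorem entsOf_getElem? (n : Int) (ds : List Int) (m : Nat) :
    (entsOf n ds)[m]? = if m < n.toNat then some (entTake n ds m) else none := by
  unfold entsOf
  rw [List.getElem?_map, PySem.List.getElem?_pyRange_one]
  by_cases h : m < n.toNat
  · rw [if_pos (by omega), if_pos h]
    simp
  · rw [if_neg (by omega), if_neg h]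
    rfl

theorem entsOf_get (n : Int) (ds : List Int) {i : Int} (h0 : 0 ≤ i) (h1 : i < n) :
    PySem.List.pyGet? (entsOf n ds) i = some (entTake n ds i) := by
  have hi : i = ((i.toNat : Nat) : Int) := by omega
  rw [hi, PySem.List.pyGet?_natCast, entsOf_getElem?, if_pos (by omega)]

theorem entTake_alive (n : Int) (ds : List Int) {i : Int} (h : i ∉ ds) :
    entTake n ds i = [mPrev ds i, i, mNext n ds i] := by
  unfold entTake; rw [List.idxOf_eq_length h, List.take_length]

theorem entTake_append_mem (n : Int) (ds : List Int) (c : Int) {i : Int} (h : i ∈ ds) :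
    entTake n (ds ++ [c]) i = entTake n ds i := by
  unfold entTake
  rw [List.idxOf_append_of_mem h,
    List.take_append_of_le_length (le_of_lt (List.idxOf_lt_length_of_mem h))]

theorem entTake_append_self (n : Int) (ds : List Int) {c : Int} (h : c ∉ ds) :
    entTake n (ds ++ [c]) c = [mPrev ds c, c, mNext n ds c] := by
  unfold entTake
  rw [List.idxOf_append, if_neg (by simpa using h)]
  simp

-- rows untouched by deleting/restoring c keep their triple
theorem entTake_append_other (n : Int) (ds : List Int) (c : Int) {i : Int} (h0 : 0 ≤ i)
    (hin : i < n) (hm : i ∉ ds) (hic : i ≠ c) (hil : i ≠ mPrev ds c) (hir : i ≠ mNext n ds c) :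
    entTake n (ds ++ [c]) i = entTake n ds i := by
  have hm' : i ∉ ds ++ [c] := by simp [hm, hic]
  rw [entTake_alive n _ hm', entTake_alive n ds hm]
  have h1 : mPrev (ds ++ [c]) i = mPrev ds i := by
    by_cases h : i ≤ c
    · exact mPrev_append_ge ds h
    · exact mPrev_append_of_ne (by omega) hin (fun hq => hir hq.symm) hm
  have h2 : mNext n (ds ++ [c]) i = mNext n ds i := by
    by_cases h : c ≤ i
    · exact mNext_append_le n ds h
    · exact mNext_append_of_ne (by omega) h0 (fun hq => hil hq.symm) hm
  rw [h1, h2]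

theorem entTake_append_left (n : Int) (ds : List Int) {c : Int} (_hcm : c ∉ ds)
    (hl : mPrev ds c ≠ -1) :
    entTake n (ds ++ [c]) (mPrev ds c) = [mPrev ds (mPrev ds c), mPrev ds c, mNext n ds c] := by
  rcases mPrev_cases ds c with ⟨hq, _⟩ | ⟨l0, llt, lnm, _⟩
  · exact absurd hq hl
  · have hm' : mPrev ds c ∉ ds ++ [c] := by
      simp only [List.mem_append, List.mem_singleton]
      rintro (h | h)
      · exact lnm h
      · omega
    rw [entTake_alive n _ hm', mPrev_append_ge ds (by omega), mNext_append_prev n ds c hl]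

theorem entTake_append_right (n : Int) (ds : List Int) {c : Int} (_hcm : c ∉ ds)
    (hr : mNext n ds c ≠ -1) :
    entTake n (ds ++ [c]) (mNext n ds c) = [mPrev ds c, mNext n ds c, mNext n ds (mNext n ds c)] := by
  rcases mNext_cases n ds c with ⟨hq, _⟩ | ⟨r0, rlt, rnm, _⟩
  · exact absurd hq hr
  · have hm' : mNext n ds c ∉ ds ++ [c] := by
      simp only [List.mem_append, List.mem_singleton]
      rintro (h | h)
      · exact rnm h
      · omega
    rw [entTake_alive n _ hm', mPrev_append_next n ds c hr, mNext_append_le n ds (by omega)]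

theorem solASet_eq {eL : List (List Int)} {i : Int} (j v : Int) {ent : List Int} (h0 : 0 ≤ i)
    (hg : PySem.List.pyGet? eL i = some ent) :
    solASet eL i j v = eL.set i.toNat (PySem.List.pySetD ent j v) := by
  unfold solASet
  rw [hg, PySem.List.pySetD_of_nonneg _ _ h0]
  rfl

theorem pyGet?_set_ne (eL : List (List Int)) (a : Nat) (v : List Int) {i : Int} (h0 : 0 ≤ i)
    (hne : a ≠ i.toNat) : PySem.List.pyGet? (eL.set a v) i = PySem.List.pyGet? eL i := by
  have hi : i = ((i.toNat : Nat) : Int) := by omega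
  rw [hi, PySem.List.pyGet?_natCast, PySem.List.pyGet?_natCast, List.getElem?_set_ne hne]

theorem pySetD_two (a b c v : Int) : PySem.List.pySetD [a, b, c] 2 v = [a, b, v] := by
  simp [PySem.List.pySetD_of_nonneg]

theorem pySetD_zero (a b c v : Int) : PySem.List.pySetD [a, b,c ] 0 v = [v, b, c] := by
  simp [PySem.List.pySetD_of_nonneg]

theorem mNext_of_prev {n : Int} {ds : List Int} {d : Int} (hl : mPrev ds d ≠ -1) (hdn : d < n)
    (hdm : d ∉ ds) : mNext n ds (mPrev ds d) = d := by
  rcases mPrev_cases ds d with ⟨hq, _⟩ | ⟨l0, llt, lnm, lbet⟩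
  · exact absurd hq hl
  · exact mNext_eq_of llt hdn hdm (fun j h1 h2 => lbet j h1 h2)

theorem mPrev_of_next {n : Int} {ds : List Int} {d : Int} (hr : mNext n ds d ≠ -1) (hd0 : 0 ≤ d)
    (hdm : d ∉ ds) : mPrev ds (mNext n ds d) = d := by
  rcases mNext_cases n ds d with ⟨hq, _⟩ | ⟨r0, rlt, rnm, rbet⟩
  · exact absurd hq hr
  · exact mPrev_eq_of hd0 r0 hdm (fun j h1 h2 => rbet j h1 h2)

-- the table after A's (at most two) pointer updates for deleting c
theorem surgC (n : Int) (ds : List Int) (c : Int)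
    (hc0 : 0 ≤ c) (hcn : c < n) (hcm : c ∉ ds) :
    (if mNext n ds c ≠ -1
      then solASet (if mPrev ds c ≠ -1 then solASet (entsOf n ds) (mPrev ds c) 2 (mNext n ds c)
                    else entsOf n ds) (mNext n ds c) 0 (mPrev ds c)
      else (if mPrev ds c ≠ -1 then solASet (entsOf n ds) (mPrev ds c) 2 (mNext n ds c)
            else entsOf n ds))
    = entsOf n (ds ++ [c]) := by
  have hlen : (entsOf n ds).length = n.toNat := by
    unfold entsOf; rw [List.length_map, PySem.List.length_pyRange_one]; omega
  have main : ∀ (eL : List (List Int)),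
      (∀ m : Nat, eL[m]? = if m < n.toNat then
          some (if (m : Int) = mPrev ds c ∧ mPrev ds c ≠ -1 then
                  [mPrev ds (mPrev ds c), mPrev ds c, mNext n ds c]
                else if (m : Int) = mNext n ds c ∧ mNext n ds c ≠ -1 then
                  [mPrev ds c, mNext n ds c, mNext n ds (mNext n ds c)]
                else entTake n ds m) else none) →
      eL = entsOf n (ds ++ [c]) := by
    intro eL hE
    apply List.ext_getElem?
    intro m
    rw [hE m, entsOf_getElem?]
    by_cases hm : m < n.toNat
    · rw [if_pos hm, if_pos hm]
      by_cases hml : (m : Int) = mPrev ds c ∧ mPrev ds c ≠ -1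
      · rw [if_pos hml, hml.1, entTake_append_left n ds hcm hml.2]
      · rw [if_neg hml]
        by_cases hmr : (m : Int) = mNext n ds c ∧ mNext n ds c ≠ -1
        · rw [if_pos hmr, hmr.1, entTake_append_right n ds hcm hmr.2]
        · rw [if_neg hmr]
          by_cases hmem : (m : Int) ∈ ds
          · rw [entTake_append_mem n ds c hmem]
          · by_cases hmc : (m : Int) = c
            · rw [hmc, entTake_append_self n ds hcm, entTake_alive n ds hcm]
            · rw [entTake_append_other n ds c (by omega) (by omega) hmem hmc
                (fun h => hml ⟨h, by rw [← h]; omega⟩) (fun h => hmr ⟨h, by rw [← h]; omega⟩)]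
    · rw [if_neg hm, if_neg hm]
  by_cases hr : mNext n ds c ≠ -1
  · rcases mNext_cases n ds c with ⟨hr1, _⟩ | ⟨hr0, hrlt, hrnm, _⟩
    · exact absurd hr1 hr
    rw [if_pos hr]
    by_cases hl : mPrev ds c ≠ -1
    · rcases mPrev_cases ds c with ⟨hl1, _⟩ | ⟨hl0, hllt, hlnm, _⟩
      · exact absurd hl1 hl
      rw [if_pos hl,
        solASet_eq 2 (mNext n ds c) hl0 (by rw [entsOf_get n ds hl0 (by omega), entTake_alive n ds hlnm]),
        pySetD_two,
        solASet_eq 0 (mPrev ds c) (by omega)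
          (by rw [pyGet?_set_ne _ _ _ (by omega) (by omega),
                entsOf_get n ds (by omega) hrlt, entTake_alive n ds hrnm]),
        pySetD_zero]
      apply main
      intro m
      rw [List.getElem?_set, List.getElem?_set, List.length_set, hlen, entsOf_getElem?]
      by_cases hm : m < n.toNat
      · by_cases hmr2 : (mNext n ds c).toNat = m
        · rw [if_pos hmr2, if_pos (show (mNext n ds c).toNat < n.toNat by omega), if_pos hm,
            if_neg (by omega), if_pos ⟨by omega, hr⟩]
        · rw [if_neg hmr2]
          by_cases hml2 : (mPrev ds c).toNat = m
          · rw [if_pos hml2, if_pos (show (mPrev ds c).toNat < n.toNat by omega), if_pos hm,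
              if_pos ⟨by omega, hl⟩]
          · rw [if_neg hml2, if_pos hm, if_pos hm,
              if_neg (fun h => hml2 (by omega)), if_neg (fun h => hmr2 (by omega))]
      · by_cases hmr2 : (mNext n ds c).toNat = m
        · rw [if_pos hmr2, if_neg (show ¬ (mNext n ds c).toNat < n.toNat by omega), if_neg hm]
        · rw [if_neg hmr2]
          by_cases hml2 : (mPrev ds c).toNat = m
          · rw [if_pos hml2, if_neg (show ¬ (mPrev ds c).toNat < n.toNat by omega), if_neg hm]
          · rw [if_neg hml2, if_neg hm, if_neg hm]
    · rw [if_neg hl]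
      rw [solASet_eq 0 (mPrev ds c) (by omega)
          (by rw [entsOf_get n ds (by omega) hrlt, entTake_alive n ds hrnm]),
        pySetD_zero]
      apply main
      intro m
      rw [List.getElem?_set, hlen, entsOf_getElem?]
      by_cases hm : m < n.toNat
      · by_cases hmr2 : (mNext n ds c).toNat = m
        · rw [if_pos hmr2, if_pos (show (mNext n ds c).toNat < n.toNat by omega), if_pos hm,
            if_neg (by omega), if_pos ⟨by omega, hr⟩]
        · rw [if_neg hmr2, if_pos hm, if_pos hm,
            if_neg (by omega), if_neg (fun h => hmr2 (by omega))]
      · by_cases hmr2 : (mNext n ds c).toNat = m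
        · rw [if_pos hmr2, if_neg (show ¬ (mNext n ds c).toNat < n.toNat by omega), if_neg hm]
        · rw [if_neg hmr2, if_neg hm, if_neg hm]
  · rw [if_neg hr]
    by_cases hl : mPrev ds c ≠ -1
    · rcases mPrev_cases ds c with ⟨hl1, _⟩ | ⟨hl0, hllt, hlnm, _⟩
      · exact absurd hl1 hl
      rw [if_pos hl,
        solASet_eq 2 (mNext n ds c) hl0 (by rw [entsOf_get n ds hl0 (by omega), entTake_alive n ds hlnm]),
        pySetD_two]
      apply main
      intro m
      rw [List.getElem?_set, hlen, entsOf_getElem?]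
      by_cases hm : m < n.toNat
      · by_cases hml2 : (mPrev ds c).toNat = m
        · rw [if_pos hml2, if_pos (show (mPrev ds c).toNat < n.toNat by omega), if_pos hm,
            if_pos ⟨by omega, hl⟩]
        · rw [if_neg hml2, if_pos hm, if_pos hm,
            if_neg (fun h => hml2 (by omega)), if_neg (by omega)]
      · by_cases hml2 : (mPrev ds c).toNat = m
        · rw [if_pos hml2, if_neg (show ¬ (mPrev ds c).toNat < n.toNat by omega), if_neg hm]
        · rw [if_neg hml2, if_neg hm, if_neg hm]
    · rw [if_neg hl]
      apply main
      intro m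
      rw [entsOf_getElem?]
      by_cases hm : m < n.toNat
      · rw [if_pos hm, if_pos hm, if_neg (by omega), if_neg (by omega)]
      · rw [if_neg hm, if_neg hm]

-- the table after A's (at most two) pointer updates for restoring d
theorem surgZ (n : Int) (ds' : List Int) (d : Int)
    (hd0 : 0 ≤ d) (hdn : d < n) (hdm : d ∉ ds') :
    (if mNext n ds' d ≠ -1
      then solASet (if mPrev ds' d ≠ -1 then solASet (entsOf n (ds' ++ [d])) (mPrev ds' d) 2 d
                    else entsOf n (ds' ++ [d])) (mNext n ds' d) 0 d
      else (if mPrev ds' d ≠ -1 then solASet (entsOf n (ds' ++ [d])) (mPrev ds' d) 2 d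
            else entsOf n (ds' ++ [d])))
    = entsOf n ds' := by
  have hlen : (entsOf n (ds' ++ [d])).length = n.toNat := by
    unfold entsOf; rw [List.length_map, PySem.List.length_pyRange_one]; omega
  have main : ∀ (eL : List (List Int)),
      (∀ m : Nat, eL[m]? = if m < n.toNat then
          some (if (m : Int) = mPrev ds' d ∧ mPrev ds' d ≠ -1 then
                  [mPrev ds' (mPrev ds' d), mPrev ds' d, d]
                else if (m : Int) = mNext n ds' d ∧ mNext n ds' d ≠ -1 then
                  [d, mNext n ds' d, mNext n ds' (mNext n ds' d)]
                else entTake n (ds' ++ [d]) m) else none) →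
      eL = entsOf n ds' := by
    intro eL hE
    apply List.ext_getElem?
    intro m
    rw [hE m, entsOf_getElem?]
    by_cases hm : m < n.toNat
    · rw [if_pos hm, if_pos hm]
      by_cases hml : (m : Int) = mPrev ds' d ∧ mPrev ds' d ≠ -1
      · rcases mPrev_cases ds' d with ⟨hq, _⟩ | ⟨l0, llt, lnm, _⟩
        · exact absurd hq hml.2
        rw [if_pos hml, hml.1, entTake_alive n ds' lnm, mNext_of_prev hml.2 hdn hdm]
      · rw [if_neg hml]
        by_cases hmr : (m : Int) = mNext n ds' d ∧ mNext n ds' d ≠ -1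
        · rcases mNext_cases n ds' d with ⟨hq, _⟩ | ⟨r0, rlt, rnm, _⟩
          · exact absurd hq hmr.2
          rw [if_pos hmr, hmr.1, entTake_alive n ds' rnm, mPrev_of_next hmr.2 hd0 hdm]
        · rw [if_neg hmr]
          by_cases hmem : (m : Int) ∈ ds'
          · rw [entTake_append_mem n ds' d hmem]
          · by_cases hmd : (m : Int) = d
            · rw [hmd, entTake_append_self n ds' hdm, entTake_alive n ds' hdm]
            · rw [entTake_append_other n ds' d (by omega) (by omega) hmem hmd
                (fun h => hml ⟨h, by rw [← h]; omega⟩) (fun h => hmr ⟨h, by rw [← h]; omega⟩)]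
    · rw [if_neg hm, if_neg hm]
  by_cases hr : mNext n ds' d ≠ -1
  · rcases mNext_cases n ds' d with ⟨hr1, _⟩ | ⟨hr0, hrlt, hrnm, _⟩
    · exact absurd hr1 hr
    rw [if_pos hr]
    by_cases hl : mPrev ds' d ≠ -1
    · rcases mPrev_cases ds' d with ⟨hl1, _⟩ | ⟨hl0, hllt, hlnm, _⟩
      · exact absurd hl1 hl
      rw [if_pos hl,
        solASet_eq 2 d hl0 (by rw [entsOf_get n (ds' ++ [d]) hl0 (by omega),
          entTake_append_left n ds' hdm hl]),
        pySetD_two,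
        solASet_eq 0 d (by omega)
          (by rw [pyGet?_set_ne _ _ _ (by omega) (by omega),
                entsOf_get n (ds' ++ [d]) (by omega) hrlt, entTake_append_right n ds' hdm hr]),
        pySetD_zero]
      apply main
      intro m
      rw [List.getElem?_set, List.getElem?_set, List.length_set, hlen]
      by_cases hm : m < n.toNat
      · by_cases hmr2 : (mNext n ds' d).toNat = m
        · rw [if_pos hmr2, if_pos (show (mNext n ds' d).toNat < n.toNat by omega), if_pos hm,
            if_neg (by omega), if_pos ⟨by omega, hr⟩]
        · rw [if_neg hmr2]
          by_cases hml2 : (mPrev ds' d).toNat = m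
          · rw [if_pos hml2, if_pos (show (mPrev ds' d).toNat < n.toNat by omega), if_pos hm,
              if_pos ⟨by omega, hl⟩]
          · rw [if_neg hml2, entsOf_getElem?, if_pos hm, if_pos hm,
              if_neg (fun h => hml2 (by omega)), if_neg (fun h => hmr2 (by omega))]
      · by_cases hmr2 : (mNext n ds' d).toNat = m
        · rw [if_pos hmr2, if_neg (show ¬ (mNext n ds' d).toNat < n.toNat by omega), if_neg hm]
        · rw [if_neg hmr2]
          by_cases hml2 : (mPrev ds' d).toNat = m
          · rw [if_pos hml2, if_neg (show ¬ (mPrev ds' d).toNat < n.toNat by omega), if_neg hm]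
          · rw [if_neg hml2, entsOf_getElem?, if_neg hm, if_neg hm]
    · rw [if_neg hl]
      rw [solASet_eq 0 d (by omega)
          (by rw [entsOf_get n (ds' ++ [d]) (by omega) hrlt, entTake_append_right n ds' hdm hr]),
        pySetD_zero]
      apply main
      intro m
      rw [List.getElem?_set, hlen]
      by_cases hm : m < n.toNat
      · by_cases hmr2 : (mNext n ds' d).toNat = m
        · rw [if_pos hmr2, if_pos (show (mNext n ds' d).toNat < n.toNat by omega), if_pos hm,
            if_neg (by omega), if_pos ⟨by omega, hr⟩]
        · rw [if_neg hmr2, entsOf_getElem?, if_pos hm, if_pos hm,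
            if_neg (by omega), if_neg (fun h => hmr2 (by omega))]
      · by_cases hmr2 : (mNext n ds' d).toNat = m
        · rw [if_pos hmr2, if_neg (show ¬ (mNext n ds' d).toNat < n.toNat by omega), if_neg hm]
        · rw [if_neg hmr2, entsOf_getElem?, if_neg hm, if_neg hm]
  · rw [if_neg hr]
    by_cases hl : mPrev ds' d ≠ -1
    · rcases mPrev_cases ds' d with ⟨hl1, _⟩ | ⟨hl0, hllt, hlnm, _⟩
      · exact absurd hl1 hl
      rw [if_pos hl,
        solASet_eq 2 d hl0 (by rw [entsOf_get n (ds' ++ [d]) hl0 (by omega),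
          entTake_append_left n ds' hdm hl]),
        pySetD_two]
      apply main
      intro m
      rw [List.getElem?_set, hlen]
      by_cases hm : m < n.toNat
      · by_cases hml2 : (mPrev ds' d).toNat = m
        · rw [if_pos hml2, if_pos (show (mPrev ds' d).toNat < n.toNat by omega), if_pos hm,
            if_pos ⟨by omega, hl⟩]
        · rw [if_neg hml2, entsOf_getElem?, if_pos hm, if_pos hm,
            if_neg (fun h => hml2 (by omega)), if_neg (by omega)]
      · by_cases hml2 : (mPrev ds' d).toNat = m
        · rw [if_pos hml2, if_neg (show ¬ (mPrev ds' d).toNat < n.toNat by omega), if_neg hm]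
        · rw [if_neg hml2, entsOf_getElem?, if_neg hm, if_neg hm]
    · rw [if_neg hl]
      apply main
      intro m
      rw [entsOf_getElem?]
      by_cases hm : m < n.toNat
      · rw [if_pos hm, if_pos hm, if_neg (by omega), if_neg (by omega)]
      · rw [if_neg hm, if_neg hm]

theorem pyGet?_fst (a b c : Int) : PySem.List.pyGet? [a, b, c] 0 = some a := by
  simp [PySem.List.pyGet?, PySem.List.pyIdx?]

theorem pyGet?_snd (a b c : Int) : PySem.List.pyGet? [a, b, c] 1 = some b := by
  simp [PySem.List.pyGet?, PySem.List.pyIdx?]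

theorem pyGet?_thd (a b c : Int) : PySem.List.pyGet? [a, b, c] 2 = some c := by
  simp [PySem.List.pyGet?, PySem.List.pyIdx?]

theorem flagsOf_length (n : Int) (ds : List Int) : (flagsOf n ds).length = n.toNat := by
  unfold flagsOf; rw [List.length_map, List.length_range]

theorem flagsOf_get (n : Int) (ds : List Int) {j : Int} (h0 : 0 ≤ j) (h1 : j < n) :
    PySem.List.pyGet? (flagsOf n ds) j = some (decide (j ∈ ds)) := by
  obtain ⟨m, rfl⟩ : ∃ m : Nat, j = (m : Int) := ⟨j.toNat, by omega⟩
  rw [PySem.List.pyGet?_natCast]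
  unfold flagsOf
  rw [List.getElem?_map, List.getElem?_range (by omega)]
  rfl

theorem flagsOf_set_true (n : Int) (ds : List Int) {c : Int} (h0 : 0 ≤ c) (_h1 : c < n) :
    PySem.List.pySetD (flagsOf n ds) c true = flagsOf n (ds ++ [c]) := by
  rw [PySem.List.pySetD_of_nonneg _ _ h0]
  apply List.ext_getElem?
  intro m
  unfold flagsOf
  rw [List.getElem?_set, List.length_map, List.length_range, List.getElem?_map, List.getElem?_map]
  by_cases hm : m < n.toNat
  · rw [List.getElem?_range hm]
    by_cases hc : c.toNat = m
    · rw [if_pos hc, if_pos (show c.toNat < n.toNat by omega)]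
      simp only [Option.map_some, Option.some.injEq, List.mem_append, List.mem_singleton]
      have h : ((m : Int) = c) := by omega
      simp [h]
    · rw [if_neg hc]
      simp only [Option.map_some, Option.some.injEq, List.mem_append, List.mem_singleton]
      have h : ¬ ((m : Int) = c) := by omega
      simp [h]
  · have hnone : (List.range n.toNat)[m]? = none :=
      List.getElem?_eq_none (by rw [List.length_range]; omega)
    rw [hnone]
    split_ifs with ha hb
    · omega
    · rfl
    · rfl

theorem flagsOf_unset (n : Int) (ds' : List Int) {d : Int} (h0 : 0 ≤ d) (_h1 : d < n)
    (hdm : d ∉ ds') :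
    PySem.List.pySetD (flagsOf n (ds' ++ [d])) d false = flagsOf n ds' := by
  rw [PySem.List.pySetD_of_nonneg _ _ h0]
  apply List.ext_getElem?
  intro m
  unfold flagsOf
  rw [List.getElem?_set, List.length_map, List.length_range, List.getElem?_map, List.getElem?_map]
  by_cases hm : m < n.toNat
  · rw [List.getElem?_range hm]
    by_cases hc : d.toNat = m
    · rw [if_pos hc, if_pos (show d.toNat < n.toNat by omega)]
      simp only [Option.map_some, Option.some.injEq]
      have h : ((m : Int) = d) := by omega
      have : (m : Int) ∉ ds' := h ▸ hdm
      simp [this]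
    · rw [if_neg hc]
      simp only [Option.map_some, Option.some.injEq, List.mem_append, List.mem_singleton]
      have h : ¬ ((m : Int) = d) := by omega
      simp [h]
  · have hnone : (List.range n.toNat)[m]? = none :=
      List.getElem?_eq_none (by rw [List.length_range]; omega)
    rw [hnone]
    split_ifs with ha hb
    · omega
    · rfl
    · rfl

theorem solBPrevAux_eq (n : Int) (ds : List Int) : ∀ (i : Int), i < n →
    solBPrevAux (flagsOf n ds) i = mPrev ds (i + 1) := by
  intro i
  fun_induction solBPrevAux (flagsOf n ds) i with
  | case1 i hcond ih =>
    intro hin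
    have h0 : 0 ≤ i := hcond.1
    have hmem : i ∈ ds := by
      have := hcond.2
      rw [flagsOf_get n ds h0 hin] at this
      simpa using this
    rw [mPrev_unfold]
    rw [if_pos (by omega), if_pos (by simpa using hmem)]
    have := ih (by omega)
    simpa using this
  | case2 i hcond h0 =>
    intro hin
    have hnm : i ∉ ds := by
      intro hmem
      exact hcond ⟨h0, by rw [flagsOf_get n ds h0 hin]; simpa using hmem⟩
    rw [mPrev_unfold, if_pos (by omega), if_neg (by simpa using hnm)]
    omega
  | case3 i hcond h0 =>
    intro hin
    rw [mPrev_unfold, if_neg (by omega)]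

theorem solBNextAux_eq (n : Int) (ds : List Int) : ∀ (i : Int), 0 ≤ i →
    solBNextAux (flagsOf n ds) i = mNext n ds (i - 1) := by
  intro i
  fun_induction solBNextAux (flagsOf n ds) i with
  | case1 i hcond ih =>
    intro h0
    have hlen : ((flagsOf n ds).length : Int) = max n 0 := by rw [flagsOf_length]; omega
    have hin : i < n := by rw [hlen] at hcond; omega
    have hmem : i ∈ ds := by
      have := hcond.2
      rw [flagsOf_get n ds h0 hin] at this
      simpa using this
    rw [mNext_unfold]
    rw [if_pos (by omega), if_pos (by simpa using hmem)]
    have := ih (by omega)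
    simpa using this
  | case2 i hcond hin =>
    intro h0
    have hlen : ((flagsOf n ds).length : Int) = max n 0 := by rw [flagsOf_length]; omega
    have hin' : i < n := by omega
    have hnm : i ∉ ds := by
      intro hmem
      exact hcond ⟨by omega, by rw [flagsOf_get n ds h0 hin']; simpa using hmem⟩
    rw [mNext_unfold, if_pos (by omega), if_neg (by simpa using hnm)]
    omega
  | case3 i hcond hin =>
    intro h0
    have hlen : ((flagsOf n ds).length : Int) = max n 0 := by rw [flagsOf_length]; omega
    rw [mNext_unfold, if_neg (by omega)]

theorem solBPrev_eq (n : Int) (ds : List Int) {cur : Int} (h : cur ≤ n) :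
    solBPrev (flagsOf n ds) cur = mPrev ds cur := by
  unfold solBPrev
  rw [solBPrevAux_eq n ds _ (by omega)]
  norm_num

theorem solBNext_eq (n : Int) (ds : List Int) {cur : Int} (h : 0 ≤ cur) :
    solBNext (flagsOf n ds) cur = mNext n ds cur := by
  unfold solBNext
  rw [solBNextAux_eq n ds _ (by omega)]
  norm_num

theorem solAHop0_eq (n : Int) (ds : List Int) {cur : Int} (h0 : 0 ≤ cur) (h1 : cur < n)
    (h2 : cur ∉ ds) : solAHop0 (entsOf n ds) cur = mPrev ds cur := by
  unfold solAHop0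
  rw [entsOf_get n ds h0 h1, entTake_alive n ds h2]
  simp only [Option.bind_some, pyGet?_fst, Option.getD_some]

theorem solAHop2_eq (n : Int) (ds : List Int) {cur : Int} (h0 : 0 ≤ cur) (h1 : cur < n)
    (h2 : cur ∉ ds) : solAHop2 (entsOf n ds) cur = mNext n ds cur := by
  unfold solAHop2
  rw [entsOf_get n ds h0 h1, entTake_alive n ds h2]
  simp only [Option.bind_some, pyGet?_thd, Option.getD_some]

theorem foldl_const {β : Type} (L : List β) (g : Int → Int) (a : Int) :
    L.foldl (fun x _ => g x) a = g^[L.length] a := by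
  induction L generalizing a with
  | nil => rfl
  | cons x xs ih => simp [List.foldl_cons, ih, Function.iterate_succ_apply]

theorem mSteps_sim (n : Int) (ds : List Int) (mv : List Int → Int → Int) (g : Int → Int)
    (hg : ∀ cur, 0 ≤ cur → cur < n → cur ∉ ds → g cur = mv ds cur)
    (hmv : ∀ cur, 0 ≤ cur → cur < n →
      (mv ds cur = -1 ∨ (0 ≤ mv ds cur ∧ mv ds cur < n ∧ mv ds cur ∉ ds))) :
    ∀ (s : Nat) (cur c' : Int), (0 ≤ cur → cur < n → cur ∉ ds) →
      mSteps n mv ds s cur = some c' →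
      g^[s] cur = c' ∧ (0 ≤ c' → c' < n → c' ∉ ds) := by
  intro s
  induction s with
  | zero => intro cur c' hc hs; exact ⟨by simpa using (Option.some_inj.mp hs), by
      cases Option.some_inj.mp hs; exact hc⟩
  | succ t ih =>
    intro cur c' hc hs
    rw [mSteps] at hs
    by_cases hcond : 0 ≤ cur ∧ cur < n
    · rw [if_pos hcond] at hs
      have hnm := hc hcond.1 hcond.2
      have hstep : g cur = mv ds cur := hg cur hcond.1 hcond.2 hnm
      have hc' : 0 ≤ mv ds cur → mv ds cur < n → mv ds cur ∉ ds := by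
        rcases hmv cur hcond.1 hcond.2 with h | h
        · intro h1 _; omega
        · intro _ _; exact h.2.2
      have := ih (mv ds cur) c' hc' hs
      rw [Function.iterate_succ_apply, hstep]
      exact this
    · rw [if_neg hcond] at hs
      exact absurd hs (by simp)

theorem mPrev_inv (n : Int) (ds : List Int) : ∀ cur : Int, 0 ≤ cur → cur < n →
    (mPrev ds cur = -1 ∨ (0 ≤ mPrev ds cur ∧ mPrev ds cur < n ∧ mPrev ds cur ∉ ds)) := by
  intro cur h0 h1
  rcases mPrev_cases ds cur with ⟨h, _⟩ | ⟨a, b, c, _⟩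
  · exact Or.inl h
  · exact Or.inr ⟨a, by omega, c⟩

theorem mNext_inv (n : Int) (ds : List Int) : ∀ cur : Int, 0 ≤ cur → cur < n →
    (mNext n ds cur = -1 ∨ (0 ≤ mNext n ds cur ∧ mNext n ds cur < n ∧ mNext n ds cur ∉ ds)) := by
  intro cur h0 h1
  rcases mNext_cases n ds cur with ⟨h, _⟩ | ⟨a, b, c, _⟩
  · exact Or.inl h
  · exact Or.inr ⟨by omega, b, c⟩

theorem stkOf_append (n : Int) : ∀ (ds : List Int) (pre : List Int) (d : Int),
    stkOf n pre (ds ++ [d]) = stkOf n pre ds ++ [[mPrev (pre ++ ds) d, d, mNext n (pre ++ ds) d]] := by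
  intro ds
  induction ds with
  | nil => intro pre d; simp [stkOf]
  | cons e rest ih =>
    intro pre d
    rw [List.cons_append, stkOf, stkOf, ih (pre ++ [e]) d]
    simp

theorem nodup_append_singleton {ds : List Int} {c : Int} (hnd : ds.Nodup) (hcm : c ∉ ds) :
    (ds ++ [c]).Nodup := by
  rw [List.nodup_append]
  refine ⟨hnd, List.nodup_singleton c, ?_⟩
  intro a ha b hb
  rw [List.mem_singleton] at hb
  subst hb
  exact fun h => hcm (h ▸ ha)

-- splitOn.go when the separator occurs nowhere: the word is returned whole
theorem go_no_sep (sep : List Char) : ∀ (l : List Char) (fuel : Nat) (cur : List Char)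
    (acc : List (List Char)), l.length ≤ fuel → (∀ j, ¬ sep <+: l.drop j) →
    PySem.Chars.splitOn.go sep fuel l cur acc = ((cur.reverse ++ l) :: acc).reverse := by
  intro l
  induction l with
  | nil =>
    intro fuel cur acc _ _
    cases fuel with
    | zero => simp [PySem.Chars.splitOn.go]
    | succ f => simp [PySem.Chars.splitOn.go]
  | cons c rest ih =>
    intro fuel cur acc hlen hocc
    cases fuel with
    | zero => simp at hlen
    | succ f =>
      rw [PySem.Chars.splitOn.go]
      rw [if_neg (by
        intro hpref
        exact hocc 0 (by simpa using List.isPrefixOf_iff_prefix.mp hpref))]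
      rw [ih f (c :: cur) acc (by simpa using hlen) (fun j => by simpa using hocc (j+1))]
      simp

-- c.split(" ") = [c] when c contains no space
theorem split?_no_sep (c : String) (h : PySem.Str.isIn " " c = false) :
    PySem.Str.split? c " " = some [c] := by
  unfold PySem.Str.split?
  have hocc : ∀ j, ¬ (" ".toList) <+: c.toList.drop j := by
    intro j hpref
    have : PySem.Chars.isIn " ".toList c.toList = true :=
      (PySem.Chars.exists_prefix_drop_iff_isIn _ _).mp ⟨j, hpref⟩
    rw [show PySem.Chars.isIn " ".toList c.toList = PySem.Str.isIn " " c from rfl, h] at this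
    exact absurd this (by simp)
  rw [show PySem.Chars.split? c.toList " ".toList =
      some (PySem.Chars.splitOn c.toList " ".toList) from rfl]
  unfold PySem.Chars.splitOn
  rw [go_no_sep _ _ _ _ _ (by omega) hocc]
  simp

theorem stepA_sim (n : Int) {c : String} {m : MCmd} {cur cur' : Int} {ds ds' : List Int}
    (hp : mParse c = some m) (hstep : mStep n (cur, ds) m = some (cur', ds'))
    (hnd : ds.Nodup) (hbd : ∀ d ∈ ds, 0 ≤ d ∧ d < n) (hc : 0 ≤ cur → cur < n → cur ∉ ds) :
    solAStep (entsOf n ds, stkOf n [] ds, cur) (solAParse c) = (entsOf n ds', stkOf n [] ds', cur')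
      ∧ ds'.Nodup ∧ (∀ d ∈ ds', 0 ≤ d ∧ d < n) ∧ (0 ≤ cur' → cur' < n → cur' ∉ ds') := by
  unfold mParse at hp
  unfold solAParse
  by_cases hC : c = "C"
  · subst hC
    rw [if_pos rfl] at hp
    simp only [Option.some_inj] at hp
    subst hp
    rw [if_neg (by decide)]
    simp only [solAStep]
    rw [show PySem.Str.pyGet? "C" 0 = some 'C' by decide]
    simp only [Option.getD_some]
    rw [if_neg (by decide), if_neg (by decide), if_pos trivial]
    simp only [mStep] at hstep
    by_cases hcond : 0 ≤ cur ∧ cur < n ∧ cur ∉ ds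
    · rw [if_pos hcond] at hstep
      simp only [Option.some_inj] at hstep
      obtain ⟨h1, h2, h3⟩ := hcond
      obtain ⟨hcur, hds⟩ : (if mNext n ds cur ≠ -1 then mNext n ds cur else mPrev ds cur) = cur'
          ∧ ds ++ [cur] = ds' := by
        constructor <;> [exact congrArg Prod.fst hstep; exact congrArg Prod.snd hstep]
      subst hds
      rw [entsOf_get n ds h1 h2, entTake_alive n ds h3]
      simp only [Option.getD_some, pyGet?_fst, pyGet?_thd]
      refine ⟨?_, nodup_append_singleton hnd h3, ?_, ?_⟩
      · rw [surgC n ds cur h1 h2 h3, stkOf_append n ds [] cur]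
        simp only [List.nil_append]
        rw [← hcur]
      · intro d hd
        rcases List.mem_append.mp hd with h | h
        · exact hbd d h
        · simp only [List.mem_singleton] at h
          subst h; exact ⟨h1, h2⟩
      · subst hcur
        by_cases hr : mNext n ds cur ≠ -1
        · rw [if_pos hr]
          rcases mNext_cases n ds cur with ⟨hq, _⟩ | ⟨r0, rlt, rnm, _⟩
          · exact absurd hq hr
          intro _ _
          simp only [List.mem_append, List.mem_singleton]
          rintro (h | h)
          · exact rnm h
          · omega
        · rw [if_neg hr]
          rcases mPrev_cases ds cur with ⟨hq, _⟩ | ⟨l0, llt, lnm, _⟩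
          · rw [hq]; intro h; omega
          intro _ _
          simp only [List.mem_append, List.mem_singleton]
          rintro (h | h)
          · exact lnm h
          · omega
    · rw [if_neg hcond] at hstep
      exact absurd hstep (by simp)
  · rw [if_neg hC] at hp
    by_cases hZ : c = "Z"
    · subst hZ
      rw [if_pos rfl] at hp
      simp only [Option.some_inj] at hp
      subst hp
      rw [if_neg (by decide)]
      simp only [solAStep]
      rw [show PySem.Str.pyGet? "Z" 0 = some 'Z' by decide]
      simp only [Option.getD_some]
      rw [if_neg (by decide), if_neg (by decide), if_neg (by decide), if_pos trivial]
      simp only [mStep] at hstep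
      by_cases hne : ds = []
      · rw [if_pos hne] at hstep
        exact absurd hstep (by simp)
      · rw [if_neg hne] at hstep
        simp only [Option.some_inj] at hstep
        obtain ⟨hcur, hds⟩ : cur = cur' ∧ ds.dropLast = ds' := by
          constructor <;> [exact congrArg Prod.fst hstep; exact congrArg Prod.snd hstep]
        subst hcur; subst hds
        set d := ds.getLast hne with hdast
        have hsplit : ds = ds.dropLast ++ [d] := (List.dropLast_append_getLast hne).symm
        have hndd : ds.dropLast.Nodup ∧ d ∉ ds.dropLast := by
          have hnd2 := hnd
          rw [hsplit, List.nodup_append] at hnd2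
          obtain ⟨h1, h2, h3⟩ := hnd2
          refine ⟨h1, fun hm => ?_⟩
          have := h3 d hm
          simp at this
        have hdmem : d ∈ ds := List.getLast_mem hne
        have hdbd := hbd d hdmem
        rw [show stkOf n [] ds = stkOf n [] ds.dropLast ++
            [[mPrev ds.dropLast d, d, mNext n ds.dropLast d]] by
          conv_lhs => rw [hsplit]
          rw [stkOf_append n ds.dropLast [] d]
          simp]
        rw [PySem.List.pop?_last]
        simp only [pyGet?_fst, pyGet?_snd, pyGet?_thd, Option.getD_some]
        refine ⟨?_, hndd.1, fun e he => hbd e (by rw [hsplit]; exact List.mem_append_left _ he), ?_⟩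
        · rw [show entsOf n ds = entsOf n (ds.dropLast ++ [d]) by rw [← hsplit]]
          rw [surgZ n ds.dropLast d hdbd.1 hdbd.2 hndd.2]
        · intro h1 h2 hmem
          exact hc h1 h2 (by rw [hsplit]; exact List.mem_append_left _ hmem)
    · rw [if_neg hZ] at hp
      by_cases hsp : PySem.Str.isIn " " c = true
      · rw [if_pos hsp] at hp
        rw [if_pos hsp]
        simp only [solAStep]
        by_cases hUD : ((PySem.List.pyGet? ((PySem.Str.split? c " ").getD []) 0).getD "") = "U" ∨
            ((PySem.List.pyGet? ((PySem.Str.split? c " ").getD []) 0).getD "") = "D"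
        · rw [if_pos hUD] at hp
          cases ht : PySem.List.pyGet? ((PySem.Str.split? c " ").getD []) 1 with
          | none => rw [ht] at hp; exact absurd hp (by simp)
          | some t =>
            rw [ht] at hp
            simp only [Option.bind_some] at hp
            cases hx : PySem.Int.ofStr? t with
            | none => rw [hx] at hp; exact absurd hp (by simp)
            | some x =>
              rw [hx] at hp
              simp only [Option.map_some, Option.some_inj] at hp
              by_cases hU : ((PySem.List.pyGet? ((PySem.Str.split? c " ").getD []) 0).getD "") = "U"
              · rw [if_pos hU] at hp ⊢
                subst hp
                simp only [mStep, Option.map_eq_some_iff] at hstep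
                obtain ⟨c2, hms, heq⟩ := hstep
                obtain ⟨hcur, hds⟩ : c2 = cur' ∧ ds = ds' := by
                  constructor <;> [exact congrArg Prod.fst heq; exact congrArg Prod.snd heq]
                subst hcur; subst hds
                have hsim := mSteps_sim n ds mPrev (solAHop0 (entsOf n ds))
                  (fun a h1 h2 h3 => solAHop0_eq n ds h1 h2 h3) (mPrev_inv n ds)
                  x.toNat cur c2 hc hms
                refine ⟨?_, hnd, hbd, hsim.2⟩
                simp only [Option.getD_some]
                rw [hx]
                simp only [Option.getD_some]
                rw [foldl_const, PySem.List.length_pyRange_one]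
                rw [show (x - 0).toNat = x.toNat by omega, hsim.1]
              · have hD : ((PySem.List.pyGet? ((PySem.Str.split? c " ").getD []) 0).getD "") = "D" := by
                  rcases hUD with h | h
                  · exact absurd h hU
                  · exact h
                rw [if_neg hU] at hp
                rw [if_neg hU, if_pos hD]
                subst hp
                simp only [mStep, Option.map_eq_some_iff] at hstep
                obtain ⟨c2, hms, heq⟩ := hstep
                obtain ⟨hcur, hds⟩ : c2 = cur' ∧ ds = ds' := by
                  constructor <;> [exact congrArg Prod.fst heq; exact congrArg Prod.snd heq]
                subst hcur; subst hds
                have hsim := mSteps_sim n ds (mNext n) (solAHop2 (entsOf n ds))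
                  (fun a h1 h2 h3 => solAHop2_eq n ds h1 h2 h3) (mNext_inv n ds)
                  x.toNat cur c2 hc hms
                refine ⟨?_, hnd, hbd, hsim.2⟩
                simp only [Option.getD_some]
                rw [hx]
                simp only [Option.getD_some]
                rw [foldl_const, PySem.List.length_pyRange_one]
                rw [show (x - 0).toNat = x.toNat by omega, hsim.1]
        · rw [if_neg hUD] at hp
          simp only [Option.some_inj] at hp
          subst hp
          simp only [mStep, Option.some_inj] at hstep
          obtain ⟨hcur, hds⟩ : cur = cur' ∧ ds = ds' := by
            constructor <;> [exact congrArg Prod.fst hstep; exact congrArg Prod.snd hstep]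
          subst hcur; subst hds
          obtain ⟨hUD1, hUD2⟩ := not_or.mp hUD
          rw [if_neg hUD1, if_neg hUD2]
          exact ⟨rfl, hnd, hbd, hc⟩
      · rw [if_neg hsp] at hp
        rw [if_neg hsp]
        cases hc0 : PySem.Str.pyGet? c 0 with
        | none => rw [hc0] at hp; exact absurd hp (by simp)
        | some c0 =>
          rw [hc0] at hp
          simp only [Option.bind_some] at hp
          by_cases hUDc : c0 = 'U' ∨ c0 = 'D'
          · rw [if_pos hUDc] at hp
            exact absurd hp (by simp)
          · rw [if_neg hUDc] at hp
            simp only [Option.some_inj] at hp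
            subst hp
            simp only [mStep, Option.some_inj] at hstep
            obtain ⟨hcur, hds⟩ : cur = cur' ∧ ds = ds' := by
              constructor <;> [exact congrArg Prod.fst hstep; exact congrArg Prod.snd hstep]
            subst hcur; subst hds
            obtain ⟨hU1, hD1⟩ := not_or.mp hUDc
            simp only [solAStep, hc0, Option.getD_some]
            rw [if_neg hU1, if_neg hD1, if_neg hC, if_neg hZ]
            exact ⟨rfl, hnd, hbd, hc⟩

theorem stepB_sim (n : Int) {c : String} {m : MCmd} {cur cur' : Int} {ds ds' : List Int}
    (hp : mParse c = some m) (hstep : mStep n (cur, ds) m = some (cur', ds'))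
    (hnd : ds.Nodup) (hbd : ∀ d ∈ ds, 0 ≤ d ∧ d < n) (hc : 0 ≤ cur → cur < n → cur ∉ ds) :
    solBStep (flagsOf n ds, ds, cur) c = (flagsOf n ds', ds', cur')
      ∧ ds'.Nodup ∧ (∀ d ∈ ds', 0 ≤ d ∧ d < n) ∧ (0 ≤ cur' → cur' < n → cur' ∉ ds') := by
  unfold mParse at hp
  simp only [solBStep]
  by_cases hC : c = "C"
  · subst hC
    rw [if_pos rfl] at hp ⊢
    simp only [Option.some_inj] at hp
    subst hp
    simp only [mStep] at hstep
    by_cases hcond : 0 ≤ cur ∧ cur < n ∧ cur ∉ ds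
    · rw [if_pos hcond] at hstep
      simp only [Option.some_inj] at hstep
      obtain ⟨h1, h2, h3⟩ := hcond
      obtain ⟨hcur, hds⟩ : (if mNext n ds cur ≠ -1 then mNext n ds cur else mPrev ds cur) = cur'
          ∧ ds ++ [cur] = ds' := by
        constructor <;> [exact congrArg Prod.fst hstep; exact congrArg Prod.snd hstep]
      subst hds
      rw [flagsOf_set_true n ds h1 h2]
      rw [solBNext_eq n (ds ++ [cur]) h1, mNext_append_le n ds (le_refl cur)]
      refine ⟨?_, nodup_append_singleton hnd h3, ?_, ?_⟩
      · rw [← hcur]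
        by_cases hr : mNext n ds cur ≠ -1
        · rw [if_pos hr, if_pos hr]
        · rw [if_neg hr, if_neg hr,
            solBPrev_eq n (ds ++ [cur]) (by omega), mPrev_append_ge ds (le_refl cur)]
      · intro d hd
        rcases List.mem_append.mp hd with h | h
        · exact hbd d h
        · simp only [List.mem_singleton] at h
          subst h; exact ⟨h1, h2⟩
      · subst hcur
        by_cases hr : mNext n ds cur ≠ -1
        · rw [if_pos hr]
          rcases mNext_cases n ds cur with ⟨hq, _⟩ | ⟨r0, rlt, rnm, _⟩
          · exact absurd hq hr
          intro _ _
          simp only [List.mem_append, List.mem_singleton]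
          rintro (h | h)
          · exact rnm h
          · omega
        · rw [if_neg hr]
          rcases mPrev_cases ds cur with ⟨hq, _⟩ | ⟨l0, llt, lnm, _⟩
          · rw [hq]; intro h; omega
          intro _ _
          simp only [List.mem_append, List.mem_singleton]
          rintro (h | h)
          · exact lnm h
          · omega
    · rw [if_neg hcond] at hstep
      exact absurd hstep (by simp)
  · rw [if_neg hC] at hp ⊢
    by_cases hZ : c = "Z"
    · subst hZ
      rw [if_pos rfl] at hp ⊢
      simp only [Option.some_inj] at hp
      subst hp
      simp only [mStep] at hstep
      by_cases hne : ds = []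
      · rw [if_pos hne] at hstep
        exact absurd hstep (by simp)
      · rw [if_neg hne] at hstep
        simp only [Option.some_inj] at hstep
        obtain ⟨hcur, hds⟩ : cur = cur' ∧ ds.dropLast = ds' := by
          constructor <;> [exact congrArg Prod.fst hstep; exact congrArg Prod.snd hstep]
        subst hcur; subst hds
        set d := ds.getLast hne with hdast
        have hsplit : ds = ds.dropLast ++ [d] := (List.dropLast_append_getLast hne).symm
        have hndd : ds.dropLast.Nodup ∧ d ∉ ds.dropLast := by
          have hnd2 := hnd
          rw [hsplit, List.nodup_append] at hnd2
          obtain ⟨h1, h2, h3⟩ := hnd2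
          refine ⟨h1, fun hm => ?_⟩
          have := h3 d hm
          simp at this
        have hdbd := hbd d (List.getLast_mem hne)
        rw [show PySem.List.pop? ds = some (d, ds.dropLast) by
          conv_lhs => rw [hsplit]
          rw [PySem.List.pop?_last]]
        rw [show flagsOf n ds = flagsOf n (ds.dropLast ++ [d]) by rw [← hsplit]]
        dsimp only
        rw [flagsOf_unset n ds.dropLast hdbd.1 hdbd.2 hndd.2]
        refine ⟨rfl, hndd.1,
          fun e he => hbd e (by rw [hsplit]; exact List.mem_append_left _ he), ?_⟩
        intro h1 h2 hmem
        exact hc h1 h2 (by rw [hsplit]; exact List.mem_append_left _ hmem)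
    · rw [if_neg hZ] at hp ⊢
      by_cases hsp : PySem.Str.isIn " " c = true
      · rw [if_pos hsp] at hp
        by_cases hUD : ((PySem.List.pyGet? ((PySem.Str.split? c " ").getD []) 0).getD "") = "U" ∨
            ((PySem.List.pyGet? ((PySem.Str.split? c " ").getD []) 0).getD "") = "D"
        · rw [if_pos hUD] at hp
          cases ht : PySem.List.pyGet? ((PySem.Str.split? c " ").getD []) 1 with
          | none => rw [ht] at hp; exact absurd hp (by simp)
          | some t =>
            rw [ht] at hp
            simp only [Option.bind_some] at hp
            cases hx : PySem.Int.ofStr? t with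
            | none => rw [hx] at hp; exact absurd hp (by simp)
            | some x =>
              rw [hx] at hp
              simp only [Option.map_some, Option.some_inj] at hp
              by_cases hU : ((PySem.List.pyGet? ((PySem.Str.split? c " ").getD []) 0).getD "") = "U"
              · rw [if_pos hU] at hp
                rw [if_pos hU]
                subst hp
                simp only [mStep, Option.map_eq_some_iff] at hstep
                obtain ⟨c2, hms, heq⟩ := hstep
                obtain ⟨hcur, hds⟩ : c2 = cur' ∧ ds = ds' := by
                  constructor <;> [exact congrArg Prod.fst heq; exact congrArg Prod.snd heq]
                subst hcur; subst hds
                have hsim := mSteps_sim n ds mPrev (solBPrev (flagsOf n ds))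
                  (fun a h1 h2 h3 => solBPrev_eq n ds (by omega)) (mPrev_inv n ds)
                  x.toNat cur c2 hc hms
                refine ⟨?_, hnd, hbd, hsim.2⟩
                simp only [Option.getD_some]
                rw [hx]
                simp only [Option.getD_some]
                rw [foldl_const, PySem.List.length_pyRange_one,
                  show (x - 0).toNat = x.toNat by omega, hsim.1]
              · have hD : ((PySem.List.pyGet? ((PySem.Str.split? c " ").getD []) 0).getD "") = "D" := by
                  rcases hUD with h | h
                  · exact absurd h hU
                  · exact h
                rw [if_neg hU] at hp
                rw [if_neg hU, if_pos hD]
                subst hp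
                simp only [mStep, Option.map_eq_some_iff] at hstep
                obtain ⟨c2, hms, heq⟩ := hstep
                obtain ⟨hcur, hds⟩ : c2 = cur' ∧ ds = ds' := by
                  constructor <;> [exact congrArg Prod.fst heq; exact congrArg Prod.snd heq]
                subst hcur; subst hds
                have hsim := mSteps_sim n ds (mNext n) (solBNext (flagsOf n ds))
                  (fun a h1 h2 h3 => solBNext_eq n ds h1) (mNext_inv n ds)
                  x.toNat cur c2 hc hms
                refine ⟨?_, hnd, hbd, hsim.2⟩
                simp only [Option.getD_some]
                rw [hx]
                simp only [Option.getD_some]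
                rw [foldl_const, PySem.List.length_pyRange_one,
                  show (x - 0).toNat = x.toNat by omega, hsim.1]
        · rw [if_neg hUD] at hp
          simp only [Option.some_inj] at hp
          subst hp
          simp only [mStep, Option.some_inj] at hstep
          obtain ⟨hcur, hds⟩ : cur = cur' ∧ ds = ds' := by
            constructor <;> [exact congrArg Prod.fst hstep; exact congrArg Prod.snd hstep]
          subst hcur; subst hds
          obtain ⟨hUD1, hUD2⟩ := not_or.mp hUD
          rw [if_neg hUD1, if_neg hUD2]
          exact ⟨rfl, hnd, hbd, hc⟩
      · rw [if_neg hsp] at hp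
        cases hc0 : PySem.Str.pyGet? c 0 with
        | none => rw [hc0] at hp; exact absurd hp (by simp)
        | some c0 =>
          rw [hc0] at hp
          simp only [Option.bind_some] at hp
          by_cases hUDc : c0 = 'U' ∨ c0 = 'D'
          · rw [if_pos hUDc] at hp
            exact absurd hp (by simp)
          · rw [if_neg hUDc] at hp
            simp only [Option.some_inj] at hp
            subst hp
            simp only [mStep, Option.some_inj] at hstep
            obtain ⟨hcur, hds⟩ : cur = cur' ∧ ds = ds' := by
              constructor <;> [exact congrArg Prod.fst hstep; exact congrArg Prod.snd hstep]
            subst hcur; subst hds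
            have hsingle : (PySem.Str.split? c " ").getD [] = [c] := by
              rw [split?_no_sep c (by simpa using hsp)]
              rfl
            have hcU : c ≠ "U" := by
              intro hq; subst hq
              exact hUDc (Or.inl (by
                have : PySem.Str.pyGet? "U" 0 = some 'U' := by decide
                rw [this] at hc0
                exact (Option.some_inj.mp hc0).symm))
            have hcD : c ≠ "D" := by
              intro hq; subst hq
              exact hUDc (Or.inr (by
                have : PySem.Str.pyGet? "D" 0 = some 'D' := by decide
                rw [this] at hc0
                exact (Option.some_inj.mp hc0).symm))
            rw [hsingle]
            rw [show PySem.List.pyGet? [c] 0 = some c by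
              simp [PySem.List.pyGet?, PySem.List.pyIdx?]]
            simp only [Option.getD_some]
            rw [if_neg hcU, if_neg hcD]
            exact ⟨rfl, hnd, hbd, hc⟩

theorem runNone (n : Int) (cmds : List String) :
    cmds.foldl (fun ost c => ost.bind (fun s => (mParse c).bind (mStep n s))) none = none := by
  induction cmds with
  | nil => rfl
  | cons c rest ih => simpa using ih

theorem mRunFrom_cons (n : Int) (st : Int × List Int) (c : String) (rest : List String) :
    mRunFrom n st (c :: rest) =
      match (mParse c).bind (mStep n st) with
      | none => none
      | some st1 => mRunFrom n st1 rest := by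
  unfold mRunFrom
  rw [List.foldl_cons]
  have h0 : (some st).bind (fun s => (mParse c).bind (mStep n s)) = (mParse c).bind (mStep n st) := rfl
  rw [h0]
  cases h : (mParse c).bind (mStep n st) with
  | none => simpa using runNone n rest
  | some st1 => rfl

theorem runA (n : Int) : ∀ (cmds : List String) (cur cur' : Int) (ds ds' : List Int),
    ds.Nodup → (∀ d ∈ ds, 0 ≤ d ∧ d < n) → (0 ≤ cur → cur < n → cur ∉ ds) →
    mRunFrom n (cur, ds) cmds = some (cur', ds') →
    (cmds.map solAParse).foldl solAStep (entsOf n ds, stkOf n [] ds, cur)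
      = (entsOf n ds', stkOf n [] ds', cur')
      ∧ ds'.Nodup ∧ (∀ d ∈ ds', 0 ≤ d ∧ d < n) ∧ (0 ≤ cur' → cur' < n → cur' ∉ ds') := by
  intro cmds
  induction cmds with
  | nil =>
    intro cur cur' ds ds' hnd hbd hc hrun
    simp only [mRunFrom, List.foldl_nil, Option.some_inj] at hrun
    cases hrun
    exact ⟨rfl, hnd, hbd, hc⟩
  | cons c rest ih =>
    intro cur cur' ds ds' hnd hbd hc hrun
    rw [mRunFrom_cons] at hrun
    cases h : (mParse c).bind (mStep n (cur, ds)) with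
    | none => rw [h] at hrun; exact absurd hrun (by simp)
    | some st1 =>
      rw [h] at hrun
      dsimp only at hrun
      obtain ⟨m, hm, hms⟩ := Option.bind_eq_some_iff.mp h
      obtain ⟨c1, ds1⟩ := st1
      have hstep := stepA_sim n hm hms hnd hbd hc
      rw [List.map_cons, List.foldl_cons, hstep.1]
      exact ih c1 cur' ds1 ds' hstep.2.1 hstep.2.2.1 hstep.2.2.2 hrun

theorem runB (n : Int) : ∀ (cmds : List String) (cur cur' : Int) (ds ds' : List Int),
    ds.Nodup → (∀ d ∈ ds, 0 ≤ d ∧ d < n) → (0 ≤ cur → cur < n → cur ∉ ds) →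
    mRunFrom n (cur, ds) cmds = some (cur', ds') →
    cmds.foldl solBStep (flagsOf n ds, ds, cur) = (flagsOf n ds', ds', cur')
      ∧ ds'.Nodup ∧ (∀ d ∈ ds', 0 ≤ d ∧ d < n) ∧ (0 ≤ cur' → cur' < n → cur' ∉ ds') := by
  intro cmds
  induction cmds with
  | nil =>
    intro cur cur' ds ds' hnd hbd hc hrun
    simp only [mRunFrom, List.foldl_nil, Option.some_inj] at hrun
    cases hrun
    exact ⟨rfl, hnd, hbd, hc⟩
  | cons c rest ih =>
    intro cur cur' ds ds' hnd hbd hc hrun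
    rw [mRunFrom_cons] at hrun
    cases h : (mParse c).bind (mStep n (cur, ds)) with
    | none => rw [h] at hrun; exact absurd hrun (by simp)
    | some st1 =>
      rw [h] at hrun
      dsimp only at hrun
      obtain ⟨m, hm, hms⟩ := Option.bind_eq_some_iff.mp h
      obtain ⟨c1, ds1⟩ := st1
      have hstep := stepB_sim n hm hms hnd hbd hc
      rw [List.foldl_cons, hstep.1]
      exact ih c1 cur' ds1 ds' hstep.2.1 hstep.2.2.1 hstep.2.2.2 hrun

theorem stkOf_snd (n : Int) : ∀ (ds pre : List Int),
    (stkOf n pre ds).map (fun t => (PySem.List.pyGet? t 1).getD 0) = ds := by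
  intro ds
  induction ds with
  | nil => intro pre; rfl
  | cons d rest ih =>
    intro pre
    rw [stkOf, List.map_cons, pyGet?_snd]
    rw [ih (pre ++ [d])]
    rfl

theorem mark_fold : ∀ (L : List Int) (base : List String), (∀ d ∈ L, 0 ≤ d) →
    ∀ m : Nat, (L.foldl (fun al d => PySem.List.pySetD al d "X") base)[m]? =
      if (m : Int) ∈ L ∧ m < base.length then some "X" else base[m]? := by
  intro L
  induction L with
  | nil => intro base hL m; simp
  | cons d rest ih =>
    intro base hL m
    rw [List.foldl_cons]
    have hd0 : 0 ≤ d := (hL d (List.mem_cons_self))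
    have hlen : (PySem.List.pySetD base d "X").length = base.length := by
      rw [PySem.List.pySetD_of_nonneg _ _ hd0, List.length_set]
    rw [ih (PySem.List.pySetD base d "X") (fun e he => hL e (List.mem_cons_of_mem d he)) m, hlen]
    rw [PySem.List.pySetD_of_nonneg _ _ hd0, List.getElem?_set]
    by_cases hm : m < base.length
    · by_cases h1 : (m : Int) ∈ rest
      · rw [if_pos ⟨h1, hm⟩, if_pos ⟨List.mem_cons_of_mem d h1, hm⟩]
      · rw [if_neg (fun h => h1 h.1)]
        by_cases h2 : d.toNat = m
        · have hmd : (m : Int) = d := by omega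
          rw [if_pos h2, if_pos (show d.toNat < base.length by omega),
            if_pos ⟨by rw [hmd]; exact List.mem_cons_self, hm⟩]
        · have hmd : ¬ (m : Int) = d := fun h => h2 (by omega)
          rw [if_neg h2, if_neg (fun hh => by
            rcases List.mem_cons.mp hh.1 with h | h
            · exact hmd h
            · exact h1 h)]
    · rw [if_neg (show ¬((m : Int) ∈ rest ∧ m < base.length) from fun h => absurd h.2 hm),
        if_neg (show ¬((m : Int) ∈ d :: rest ∧ m < base.length) from fun h => absurd h.2 hm)]
      by_cases h2 : d.toNat = m
      · rw [if_pos h2, if_neg (show ¬ d.toNat < base.length by omega),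
          List.getElem?_eq_none (show base.length ≤ m by omega)]
      · rw [if_neg h2]

theorem finalA (n : Int) (ds : List Int) (hbd : ∀ d ∈ ds, 0 ≤ d ∧ d < n) :
    (stkOf n [] ds).reverse.foldl
      (fun al t => PySem.List.pySetD al ((PySem.List.pyGet? t 1).getD 0) "X")
      (List.replicate n.toNat "O")
    = (List.range n.toNat).map (fun m : Nat => if (m : Int) ∈ ds then "X" else "O") := by
  have h1 : (stkOf n [] ds).reverse.foldl
      (fun al t => PySem.List.pySetD al ((PySem.List.pyGet? t 1).getD 0) "X")
      (List.replicate n.toNat "O")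
      = ds.reverse.foldl (fun al d => PySem.List.pySetD al d "X") (List.replicate n.toNat "O") := by
    rw [← List.foldl_map (f := fun t => (PySem.List.pyGet? t 1).getD 0)
      (g := fun al d => PySem.List.pySetD al d "X")]
    rw [List.map_reverse, stkOf_snd n ds []]
  rw [h1]
  apply List.ext_getElem?
  intro m
  rw [mark_fold ds.reverse (List.replicate n.toNat "O")
    (fun d hd => (hbd d (List.mem_reverse.mp hd)).1) m]
  rw [List.length_replicate, List.getElem?_map]
  by_cases hm : m < n.toNat
  · rw [List.getElem?_range hm]
    by_cases h1 : (m : Int) ∈ ds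
    · rw [if_pos ⟨List.mem_reverse.mpr h1, hm⟩]
      simp [h1]
    · rw [if_neg (fun h => h1 (List.mem_reverse.mp h.1))]
      rw [List.getElem?_replicate, if_pos hm]
      simp [h1]
  · rw [if_neg (fun h => absurd h.2 hm)]
    rw [List.getElem?_replicate, if_neg hm,
      List.getElem?_eq_none (show (List.range n.toNat).length ≤ m by rw [List.length_range]; omega)]
    rfl

theorem finalB (n : Int) (ds : List Int) :
    (flagsOf n ds).map (fun d => if d then "X" else "O")
    = (List.range n.toNat).map (fun m : Nat => if (m : Int) ∈ ds then "X" else "O") := by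
  unfold flagsOf
  rw [List.map_map]
  apply List.map_congr_left
  intro m _
  by_cases h : (m : Int) ∈ ds <;> simp [h]

theorem entsOf_init (n : Int) :
    (PySem.List.pyRange 0 n 1).map (fun i => [i - 1, i, if i < n - 1 then i + 1 else -1])
      = entsOf n [] := by
  unfold entsOf
  apply List.map_congr_left
  intro i hi
  rw [PySem.List.mem_pyRange_one] at hi
  unfold entTake
  rw [List.take_nil]
  have h1 : mPrev [] i = i - 1 := by
    rw [mPrev_unfold]
    by_cases h : 0 < i
    · rw [if_pos h, if_neg (by simp)]
    · rw [if_neg h]; omega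
  have h2 : mNext n [] i = if i < n - 1 then i + 1 else -1 := by
    rw [mNext_unfold]
    by_cases h : i + 1 < n
    · rw [if_pos h, if_neg (by simp), if_pos (by omega)]
    · rw [if_neg h, if_neg (by omega)]
  rw [h1, h2]

theorem flags_init (n : Int) : List.replicate n.toNat false = flagsOf n [] := by
  unfold flagsOf
  have : (fun i : Nat => decide ((i : Int) ∈ ([] : List Int))) = (fun _ : Nat => false) :=
    funext (fun i => by simp)
  rw [this, List.map_const', List.length_range]

-- ===== VERDICT (by name: the statement is the Claim_ definition above) =====
theorem solution_spec : Claim_equal_solution := by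
  unfold Claim_equal_solution
  intro n k cmd _hdom hpre
  unfold Spec_solution solution solution_alt
  unfold Pre_solution at hpre
  rw [Option.isSome_iff_exists] at hpre
  obtain ⟨fin, hfin⟩ := hpre
  obtain ⟨cur', ds'⟩ := fin
  have hA := runA n cmd k cur' [] ds' List.nodup_nil (by simp) (fun _ _ => by simp) hfin
  have hB := runB n cmd k cur' [] ds' List.nodup_nil (by simp) (fun _ _ => by simp) hfin
  rw [show stkOf n [] [] = ([] : List (List Int)) from rfl] at hA
  rw [← flags_init n] at hB
  dsimp only
  rw [entsOf_init n, hA.1, hB.1]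
  dsimp only
  rw [finalA n ds' hA.2.2.1, finalB n ds']
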